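-- pv_equiv track=rewrite | github.com/kmanju8/advent-of-code-2022 | day20/d20.py | make_reg
-- ===== SOURCE A (Python) =====
-- def make_reg(o, value, length):
--     # let's just do if too big first
--
--
--     # if o+value == 0 or o+value == length-1:
--     #     return length
--     if o+value == 0:
--         return 0
--     elif o+value == length-1:
--         return length
--     elif (o+value>=0 and o+value<length):
--         return(o+value)
--     else:
--         # o+value == length-1 too big
--         return make_reg(((o+value)%length)+((o+value)//length), 0 ,length)
-- ===== SOURCE B (Python) =====
-- def make_reg(o, value, length):
--     # Closed form: the relocation step s -> s%length + s//length preserves s modulo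
--     # (length-1), so the recursion's fixed point is just s % (length-1), with the
--     # two special endpoints (0 and length-1) handled up front.
--     s = o + value
--     if s == 0:
--         return 0
--     if s == length - 1:
--         return length
--     r = s % (length - 1)
--     if r == 0 and s > 0:
--         return length
--     return r
-- ===== Notes on version B (the rewrite author's own statement) =====
-- stated objective: simpler
-- what changed: Replaces A's normalize-and-recurse with a closed form: each step s -> s%length + s//length preserves s modulo length-1, so B returns s % (length-1) directly (endpoints 0 and length-1 special-cased); speed difference not measurable at these sizes.
-- outside the precondition, e.g. on make_reg(-30, 0, -5): A returns -5, B returns 0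
import Mathlib
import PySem

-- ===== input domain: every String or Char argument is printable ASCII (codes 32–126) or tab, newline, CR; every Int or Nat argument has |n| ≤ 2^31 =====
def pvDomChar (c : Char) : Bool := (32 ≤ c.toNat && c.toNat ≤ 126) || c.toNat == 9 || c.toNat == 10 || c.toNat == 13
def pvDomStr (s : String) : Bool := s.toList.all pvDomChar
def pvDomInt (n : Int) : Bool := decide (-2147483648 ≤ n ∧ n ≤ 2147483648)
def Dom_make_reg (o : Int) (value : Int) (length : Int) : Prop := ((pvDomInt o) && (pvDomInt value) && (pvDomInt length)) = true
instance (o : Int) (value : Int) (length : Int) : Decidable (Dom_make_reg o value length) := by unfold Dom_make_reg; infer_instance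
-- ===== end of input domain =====

-- B replaces A's normalize-and-recurse with the closed form s % (length-1) (endpoints special-cased): simpler, no recursion.


-- ===== PORT A =====
-- Fuel makes A's (not always terminating) recursion total; on Pre_ the fuel
-- (o+value).natAbs + 2 exceeds the recursion depth, so the port is exact there.
def make_regFuel : Nat → Int → Int → Int → Int
  | 0, _, _, _ => 0
  | Nat.succ f, o, value, length =>
    if o + value = 0 then 0
    else if o + value = length - 1 then length
    else if 0 ≤ o + value ∧ o + value < length then o + value
    else make_regFuel f (PySem.Int.mod (o + value) length + PySem.Int.floordiv (o + value) length) 0 length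

def make_reg (o : Int) (value : Int) (length : Int) : Int :=
  make_regFuel ((o + value).natAbs + 2) o value length

-- ===== PORT B =====
def make_reg_alt (o : Int) (value : Int) (length : Int) : Int :=
  let s := o + value
  if s = 0 then 0
  else if s = length - 1 then length
  else
    let r := PySem.Int.mod s (length - 1)
    if r = 0 ∧ 0 < s then length else r

-- ===== PRECONDITION & SPEC =====
-- Pre_ excludes lengths < 2 except when o+value is 0 or length-1 (immediate returns):
-- there A raises (ZeroDivisionError for length 0, RecursionError otherwise) or, on a thin
-- set of negative lengths, terminates only through an accidental negative-modulus cycle.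
def Pre_make_reg (o : Int) (value : Int) (length : Int) : Prop :=
  2 ≤ length ∨ o + value = 0 ∨ o + value = length - 1
instance (o : Int) (value : Int) (length : Int) : Decidable (Pre_make_reg o value length) := by
  unfold Pre_make_reg; infer_instance

def pvWitness_make_reg : Int × Int × Int := (3, 9, 5)

def Spec_make_reg (o : Int) (value : Int) (length : Int) (out : Int) : Prop := out = make_reg_alt o value length
instance (o : Int) (value : Int) (length : Int) (out : Int) : Decidable (Spec_make_reg o value length out) := by unfold Spec_make_reg; infer_instance

-- ===== CLAIM (what is proved, stated in full; the proofs are below) =====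
def Claim_equal_make_reg : Prop := ∀ (o : Int) (value : Int) (length : Int), Dom_make_reg o value length → Pre_make_reg o value length → Spec_make_reg o value length (make_reg o value length)

-- ===== LEMMAS AND PROOFS =====

-- B's value as a function of the sum s = o + value.
def altF (s L : Int) : Int :=
  if s = 0 then 0
  else if s = L - 1 then L
  else if PySem.Int.mod s (L - 1) = 0 ∧ 0 < s then L else PySem.Int.mod s (L - 1)

theorem make_reg_alt_eq_altF (o value length : Int) :
    make_reg_alt o value length = altF (o + value) length := by
  simp [make_reg_alt, altF]

-- The relocation step s ↦ s%L + s//L preserves altF (for 2 ≤ L, on non-terminal s).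
theorem altF_step (s L : Int) (hL : 2 ≤ L) (h0 : s ≠ 0) (h1 : s ≠ L - 1)
    (h2 : ¬ (0 ≤ s ∧ s < L)) :
    altF (PySem.Int.mod s L + PySem.Int.floordiv s L) L = altF s L := by
  have hLpos : (0:Int) < L := by omega
  have hL1 : (0:Int) < L - 1 := by omega
  rw [PySem.Int.mod_eq_emod_of_pos hLpos, PySem.Int.floordiv_eq_ediv_of_pos hLpos]
  set s' := s % L + s / L with hs'
  have hid : s' = s - (L - 1) * (s / L) := by
    rw [hs']; linear_combination Int.emod_add_mul_ediv s L
  have hcong : s' % (L - 1) = s % (L - 1) := by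
    rw [hid, Int.sub_mul_emod_self_left]
  have hmodrange := Int.emod_nonneg s (by omega : L ≠ 0)
  have hmodlt := Int.emod_lt_of_pos s hLpos
  have hm1nonneg := Int.emod_nonneg s (by omega : L - 1 ≠ 0)
  have hm1lt := Int.emod_lt_of_pos s hL1
  unfold altF
  rw [PySem.Int.mod_eq_emod_of_pos hL1, PySem.Int.mod_eq_emod_of_pos hL1, hcong]
  rw [if_neg h0, if_neg h1]
  rcases lt_or_ge s 0 with hneg | hpos
  · -- s < 0: the step lands in [s+1, L-2]
    have hqneg : s / L ≤ -1 := by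
      have h := Int.ediv_neg_of_neg_of_pos hneg hLpos; omega
    have hub : s' ≤ L - 2 := by rw [hs']; omega
    rw [if_neg (by omega : ¬ (s % (L - 1) = 0 ∧ 0 < s))]
    by_cases hz : s' = 0
    · have hm : s % (L - 1) = 0 := by rw [← hcong, hz]; simp
      rw [if_pos hz, hm]
    · rw [if_neg hz, if_neg (by omega : s' ≠ L - 1)]
      by_cases hz' : 0 ≤ s'
      · -- landed in [1, L-2]: terminal value s' = s % (L-1)
        have hv : s % (L - 1) = s' := by
          rw [← hcong]; exact Int.emod_eq_of_lt hz' (by omega)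
        rw [if_neg (by omega : ¬ (s % (L - 1) = 0 ∧ 0 < s')), hv]
      · rw [if_neg (by omega : ¬ (s % (L - 1) = 0 ∧ 0 < s'))]
  · -- 0 ≤ s, so (by h2) L ≤ s: the step lands in [1, s-1]
    have hsL : L ≤ s := by omega
    have hq1 : 1 ≤ s / L := (Int.le_ediv_iff_mul_le hLpos).mpr (by omega)
    have hlb : 1 ≤ s' := by rw [hs']; omega
    rw [if_neg (by omega : s' ≠ 0)]
    by_cases hne1 : s' = L - 1
    · have hm : s % (L - 1) = 0 := by
        rw [← hcong, hne1, Int.emod_self]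
      rw [if_pos hne1, if_pos (by exact ⟨hm, by omega⟩)]
    · rw [if_neg hne1]
      by_cases hz' : s' < L
      · have hv : s % (L - 1) = s' := by
          rw [← hcong]; exact Int.emod_eq_of_lt (by omega) (by omega)
        rw [if_neg (by omega : ¬ (s % (L - 1) = 0 ∧ 0 < s')),
            if_neg (by omega : ¬ (s % (L - 1) = 0 ∧ 0 < s)), hv]
      · by_cases hm : s % (L - 1) = 0
        · rw [if_pos ⟨hm, by omega⟩, if_pos ⟨hm, by omega⟩]
        · rw [if_neg (by tauto), if_neg (by tauto)]

-- Terminal case: with any positive fuel, A's loop body returns at once and agrees with altF.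
theorem make_regFuel_terminal (g : Nat) (o value L : Int) (hL : 2 ≤ L)
    (hlo : 0 ≤ o + value) (hhi : o + value < L) :
    make_regFuel (g + 1) o value L = altF (o + value) L := by
  have hL1 : (0:Int) < L - 1 := by omega
  simp only [make_regFuel]
  unfold altF
  by_cases h0 : o + value = 0
  · rw [if_pos h0, if_pos h0]
  · rw [if_neg h0, if_neg h0]
    by_cases h1 : o + value = L - 1
    · rw [if_pos h1, if_pos h1]
    · rw [if_neg h1, if_neg h1, if_pos ⟨hlo, hhi⟩,
          PySem.Int.mod_eq_emod_of_pos hL1]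
      have hv : (o + value) % (L - 1) = o + value :=
        Int.emod_eq_of_lt hlo (by omega)
      rw [if_neg (by omega : ¬ ((o + value) % (L - 1) = 0 ∧ 0 < o + value)), hv]

-- Main fuel lemma: enough fuel makes port A compute altF.
theorem make_regFuel_eq (fuel : Nat) : ∀ (o value L : Int), 2 ≤ L →
    (o + value).natAbs + 2 ≤ fuel → make_regFuel fuel o value L = altF (o + value) L := by
  induction fuel with
  | zero => intro o value L _ h; omega
  | succ f ih =>
    intro o value L hL hfuel
    have hLpos : (0:Int) < L := by omega
    by_cases hterm : 0 ≤ o + value ∧ o + value < L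
    · exact make_regFuel_terminal f o value L hL hterm.1 hterm.2
    · set s := o + value with hs
      have h0 : s ≠ 0 := by omega
      have h1 : s ≠ L - 1 := by omega
      simp only [make_regFuel]
      rw [if_neg h0, if_neg h1, if_neg hterm]
      set s' := PySem.Int.mod s L + PySem.Int.floordiv s L with hs'
      have hs'' : s' = s % L + s / L := by
        rw [hs', PySem.Int.mod_eq_emod_of_pos hLpos, PySem.Int.floordiv_eq_ediv_of_pos hLpos]
      have hid : s' = s - (L - 1) * (s / L) := by
        rw [hs'']; linear_combination Int.emod_add_mul_ediv s L
      have hmodrange := Int.emod_nonneg s (by omega : L ≠ 0)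
      have hmodlt := Int.emod_lt_of_pos s hLpos
      have hstep := altF_step s L hL h0 h1 hterm
      rw [← hs'] at hstep
      rcases lt_or_ge s 0 with hneg | hpos
      · have hqneg : s / L ≤ -1 := by
          have h := Int.ediv_neg_of_neg_of_pos hneg hLpos; omega
        have hub : s' ≤ L - 2 := by rw [hs'']; omega
        have hlb : s + 1 ≤ s' := by
          have hmul : (L - 1) * (s / L) ≤ -(L - 1) := by nlinarith
          omega
        by_cases hz' : 0 ≤ s'
        · -- one more (terminal) step suffices
          obtain ⟨g, rfl⟩ : ∃ g, f = g + 1 := ⟨f - 1, by omega⟩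
          rw [show make_regFuel (g + 1) s' 0 L = altF (s' + 0) L from
              make_regFuel_terminal g s' 0 L hL (by omega) (by omega)]
          rw [show s' + (0:Int) = s' from by ring, hstep]
        · -- still negative: natAbs strictly decreased
          have habs : (s' + 0).natAbs + 2 ≤ f := by
            have : s' + 0 = s' := by ring
            rw [this]; omega
          rw [ih s' 0 L hL habs, show s' + (0:Int) = s' from by ring, hstep]
      · have hsL : L ≤ s := by omega
        have hq1 : 1 ≤ s / L := (Int.le_ediv_iff_mul_le hLpos).mpr (by omega)
        have hlb : 1 ≤ s' := by rw [hs'']; omega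
        have hub : s' ≤ s - 1 := by
          have hmul : L - 1 ≤ (L - 1) * (s / L) := by nlinarith
          omega
        have habs : (s' + 0).natAbs + 2 ≤ f := by
          have : s' + 0 = s' := by ring
          rw [this]; omega
        rw [ih s' 0 L hL habs, show s' + (0:Int) = s' from by ring, hstep]

-- ===== VERDICT (by name: the statement is the Claim_ definition above) =====
theorem make_reg_spec : Claim_equal_make_reg := by
  intro o value L _hdom hpre
  unfold Spec_make_reg
  rw [make_reg_alt_eq_altF]
  by_cases hL : 2 ≤ L
  · exact make_regFuel_eq ((o + value).natAbs + 2) o value L hL (le_refl _)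
  · -- Pre_ then forces an immediate return: o+value = 0 or o+value = L-1
    unfold make_reg
    rcases hpre with h | h0 | h1
    · omega
    · simp only [make_regFuel, altF]
      rw [if_pos h0, if_pos h0]
    · simp only [make_regFuel, altF]
      by_cases h0 : o + value = 0
      · rw [if_pos h0, if_pos h0]
      · rw [if_neg h0, if_neg h0, if_pos h1, if_pos h1]
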